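-- pv_equiv track=rewrite | github.com/samsaadhanii/scl | YMK/inp_trans.py | escape_vowel1
-- ===== SOURCE A (Python) =====
-- def escape_vowel1(sen):
--     vowel = ['a', 'A', 'e', 'E', 'i', 'I', 'o', 'O', 'u', 'U', 'q', 'Q', 'L']
--     out_sen = ""
--     ind = 0
--     while ind < len(sen):
--           now = sen[ind]
--           if ind == 0:
--              pre = ""
--           else:
--              pre = sen[ind - 1]
--           if ind + 1 < len(sen):
--              nxt = sen[ind + 1]
--           else:
--              nxt = ""
--
--           if now == "*":
--              if nxt in vowel:
--                 if ind + 2 < len(sen) and sen[ind + 2] in ['H', 'M']: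
--                    out_sen = out_sen + nxt + sen[ind + 2] + now
--                    ind += 3
--                 elif ind + 2 < len(sen) and sen[ind + 2] in vowel:
--                    out_sen = out_sen + nxt + now + sen[ind + 2]
--                    ind += 3
--                 else:
--                    out_sen = out_sen + nxt + now
--                    ind += 2
--              elif nxt in ['H','M'] :
--                 out_sen = out_sen + nxt + now
--                 ind += 2
--              else:
--                 out_sen = out_sen + now
--                 ind += 1
--           else:
--              out_sen += now
--              ind += 1
--     return out_sen
-- ===== SOURCE B (Python) =====
-- # B: stateless per-position map. Each '*' starts its own token (the consumed
-- # characters after a '*' are vowels/H/M, never '*'), so the transformation is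
-- # purely local: every position emits a piece depending only on its 2-char
-- # neighbourhood, and the result is the join of all pieces.
--
-- _V = set('aAeEiIoOuUqQL')
-- _HM = {'H', 'M'}
--
--
-- def _piece(s, k):
--     c = s[k]
--     if c == '*':
--         a = s[k + 1] if k + 1 < len(s) else ''
--         b = s[k + 2] if k + 2 < len(s) else ''
--         if a in _V:
--             if b in _HM:
--                 return a + b + '*'
--             if b in _V:
--                 return a + '*' + b
--             return a + '*'
--         if a in _HM:
--             return a + '*'
--         return '*'
--     if k >= 1 and s[k - 1] == '*' and (c in _V or c in _HM):
--         return ''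
--     if k >= 2 and s[k - 2] == '*' and s[k - 1] in _V and (c in _V or c in _HM):
--         return ''
--     return c
--
--
-- def escape_vowel1(sen):
--     return ''.join(_piece(sen, k) for k in range(len(sen)))
-- ===== Notes on version B (the rewrite author's own statement) =====
-- stated objective: alternative
-- what changed: Replaces A's stateful index-advancing while-loop by a stateless per-position map: a '*'-token never consumes another '*', so each position's contribution is determined locally by its two neighbours on either side, and the output is the join of these independent pieces.
import Mathlib
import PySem

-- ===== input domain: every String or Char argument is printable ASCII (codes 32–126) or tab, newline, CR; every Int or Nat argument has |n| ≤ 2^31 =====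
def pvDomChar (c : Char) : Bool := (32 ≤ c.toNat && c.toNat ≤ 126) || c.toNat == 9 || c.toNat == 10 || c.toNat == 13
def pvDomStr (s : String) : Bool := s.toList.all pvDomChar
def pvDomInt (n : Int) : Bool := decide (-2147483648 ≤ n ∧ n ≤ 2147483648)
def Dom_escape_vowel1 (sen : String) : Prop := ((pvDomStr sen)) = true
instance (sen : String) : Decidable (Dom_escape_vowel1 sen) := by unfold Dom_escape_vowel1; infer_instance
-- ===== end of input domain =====

-- B replaces A's stateful index-advancing while-loop by a stateless per-position map
-- (each position's piece depends only on its 2-char neighbourhood); same cost, different algorithm.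

-- shared literal tables (the Python constants ['a','A',...] and ['H','M'])
def vowels : List Char := ['a', 'A', 'e', 'E', 'i', 'I', 'o', 'O', 'u', 'U', 'q', 'Q', 'L']
def hm : List Char := ['H', 'M']

-- ===== PORT A =====
-- A's while-loop over the string, accumulating out_sen; Python's "" / 1-char lookups
-- sen[ind+k] with bounds guards become guarded `getD` reads.  (A also computes `pre`,
-- which is never used; it is omitted.)
def loopA (l : List Char) (out : List Char) (ind : Nat) : List Char :=
  if h : ind < l.length then
    if l.getD ind ' ' = '*' then
      if ind + 1 < l.length ∧ l.getD (ind + 1) ' ' ∈ vowels then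
        if ind + 2 < l.length ∧ l.getD (ind + 2) ' ' ∈ hm then
          loopA l (out ++ [l.getD (ind + 1) ' ', l.getD (ind + 2) ' ', l.getD ind ' ']) (ind + 3)
        else if ind + 2 < l.length ∧ l.getD (ind + 2) ' ' ∈ vowels then
          loopA l (out ++ [l.getD (ind + 1) ' ', l.getD ind ' ', l.getD (ind + 2) ' ']) (ind + 3)
        else
          loopA l (out ++ [l.getD (ind + 1) ' ', l.getD ind ' ']) (ind + 2)
      else if ind + 1 < l.length ∧ l.getD (ind + 1) ' ' ∈ hm then
        loopA l (out ++ [l.getD (ind + 1) ' ', l.getD ind ' ']) (ind + 2)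
      else
        loopA l (out ++ [l.getD ind ' ']) (ind + 1)
    else
      loopA l (out ++ [l.getD ind ' ']) (ind + 1)
  else out
termination_by l.length - ind
decreasing_by all_goals omega

def escape_vowel1 (sen : String) : String := String.mk (loopA sen.toList [] 0)

-- ===== PORT B =====
-- the local piece emitted at position k (Source B's _piece)
def pieceB (l : List Char) (k : Nat) : List Char :=
  if l.getD k ' ' = '*' then
    if k + 1 < l.length ∧ l.getD (k + 1) ' ' ∈ vowels then
      if k + 2 < l.length ∧ l.getD (k + 2) ' ' ∈ hm then
        [l.getD (k + 1) ' ', l.getD (k + 2) ' ', '*']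
      else if k + 2 < l.length ∧ l.getD (k + 2) ' ' ∈ vowels then
        [l.getD (k + 1) ' ', '*', l.getD (k + 2) ' ']
      else [l.getD (k + 1) ' ', '*']
    else if k + 1 < l.length ∧ l.getD (k + 1) ' ' ∈ hm then
      [l.getD (k + 1) ' ', '*']
    else ['*']
  else if 1 ≤ k ∧ l.getD (k - 1) ' ' = '*' ∧ (l.getD k ' ' ∈ vowels ∨ l.getD k ' ' ∈ hm) then
    []
  else if 2 ≤ k ∧ l.getD (k - 2) ' ' = '*' ∧ l.getD (k - 1) ' ' ∈ vowels ∧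
          (l.getD k ' ' ∈ vowels ∨ l.getD k ' ' ∈ hm) then
    []
  else [l.getD k ' ']

def escape_vowel1_alt (sen : String) : String :=
  String.mk ((List.range sen.toList.length).flatMap (pieceB sen.toList))

-- ===== PRECONDITION & SPEC =====
def Spec_escape_vowel1 (sen : String) (out : String) : Prop := out = escape_vowel1_alt sen
instance (sen : String) (out : String) : Decidable (Spec_escape_vowel1 sen out) := by unfold Spec_escape_vowel1; infer_instance

-- ===== CLAIM (what is proved, stated in full; the proofs are below) =====
def Claim_equal_escape_vowel1 : Prop := ∀ (sen : String), Dom_escape_vowel1 sen → Spec_escape_vowel1 sen (escape_vowel1 sen)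

-- ===== LEMMAS AND PROOFS =====

lemma vowel_ne_star {a : Char} (h : a ∈ vowels) : a ≠ '*' := by
  rintro rfl; exact absurd h (by decide)

lemma hm_ne_star {a : Char} (h : a ∈ hm) : a ≠ '*' := by
  rintro rfl; exact absurd h (by decide)

lemma hm_not_vowel {a : Char} (h : a ∈ hm) : a ∉ vowels := by
  simp only [hm, List.mem_cons, List.not_mem_nil, or_false] at h
  rcases h with rfl | rfl <;> decide

lemma getD_out {l : List Char} {k : Nat} (h : l.length ≤ k) : l.getD k ' ' = ' ' :=
  List.getD_eq_default _ _ h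

-- the piece at a consumed position right after a '*'
lemma pieceB_eat1 {l : List Char} {ind : Nat} (hs : l.getD ind ' ' = '*')
    (ha : l.getD (ind + 1) ' ' ∈ vowels ∨ l.getD (ind + 1) ' ' ∈ hm) :
    pieceB l (ind + 1) = [] := by
  have hne : ¬ l.getD (ind + 1) ' ' = '*' := by
    rcases ha with ha | ha
    · exact vowel_ne_star ha
    · exact hm_ne_star ha
  have e1 : ind + 1 - 1 = ind := by omega
  unfold pieceB
  rw [if_neg hne, e1, if_pos ⟨by omega, hs, ha⟩]

-- the piece at a consumed position two after a '*'
lemma pieceB_eat2 {l : List Char} {ind : Nat} (hs : l.getD ind ' ' = '*')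
    (ha : l.getD (ind + 1) ' ' ∈ vowels)
    (hb : l.getD (ind + 2) ' ' ∈ vowels ∨ l.getD (ind + 2) ' ' ∈ hm) :
    pieceB l (ind + 2) = [] := by
  have hne : ¬ l.getD (ind + 2) ' ' = '*' := by
    rcases hb with hb | hb
    · exact vowel_ne_star hb
    · exact hm_ne_star hb
  have e1 : ind + 2 - 1 = ind + 1 := by omega
  have e2 : ind + 2 - 2 = ind := by omega
  unfold pieceB
  rw [if_neg hne, e1, e2,
      if_neg (fun hcon => vowel_ne_star ha hcon.2.1),
      if_pos ⟨by omega, hs, ha, hb⟩]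

-- main invariant: from any position that is not consumed by an earlier token,
-- A's loop produces exactly the concatenation of B's local pieces
lemma loopA_pieces (l : List Char) (m : Nat) : ∀ (ind : Nat), l.length - ind ≤ m →
    (1 ≤ ind → ¬(l.getD (ind - 1) ' ' = '*' ∧
        (l.getD ind ' ' ∈ vowels ∨ l.getD ind ' ' ∈ hm))) →
    (2 ≤ ind → ¬(l.getD (ind - 2) ' ' = '*' ∧ l.getD (ind - 1) ' ' ∈ vowels ∧
        (l.getD ind ' ' ∈ vowels ∨ l.getD ind ' ' ∈ hm))) →
    ∀ out : List Char,
      loopA l out ind = out ++ (List.range' ind (l.length - ind)).flatMap (pieceB l) := by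
  induction m with
  | zero =>
    intro ind hle h1 h2 out
    have hn : ¬ ind < l.length := by omega
    rw [loopA, dif_neg hn]
    have : l.length - ind = 0 := by omega
    simp [this]
  | succ m ih =>
    intro ind hle h1 h2 out
    by_cases hn : ind < l.length
    · rw [loopA, dif_pos hn]
      by_cases hs : l.getD ind ' ' = '*'
      · rw [if_pos hs, hs]
        by_cases hC1 : ind + 1 < l.length ∧ l.getD (ind + 1) ' ' ∈ vowels
        · rw [if_pos hC1]
          by_cases hC2 : ind + 2 < l.length ∧ l.getD (ind + 2) ' ' ∈ hm
          · -- 3-char token: vowel + H/M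
            rw [if_pos hC2]
            have hsplit : l.length - ind = (l.length - (ind + 3)) + 1 + 1 + 1 := by omega
            rw [ih (ind + 3) (by omega)
                  (fun _ hcon => hm_ne_star hC2.2 (by simpa using hcon.1))
                  (fun _ hcon => vowel_ne_star hC1.2 (by simpa using hcon.1)),
                hsplit, List.range'_succ, List.range'_succ, List.range'_succ]
            have p0 : pieceB l ind = [l.getD (ind + 1) ' ', l.getD (ind + 2) ' ', '*'] := by
              unfold pieceB; rw [if_pos hs, if_pos hC1, if_pos hC2]
            simp [p0, pieceB_eat1 hs (Or.inl hC1.2), pieceB_eat2 hs hC1.2 (Or.inr hC2.2)]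
          · rw [if_neg hC2]
            by_cases hC3 : ind + 2 < l.length ∧ l.getD (ind + 2) ' ' ∈ vowels
            · -- 3-char token: vowel + vowel
              rw [if_pos hC3]
              have hsplit : l.length - ind = (l.length - (ind + 3)) + 1 + 1 + 1 := by omega
              rw [ih (ind + 3) (by omega)
                    (fun _ hcon => vowel_ne_star hC3.2 (by simpa using hcon.1))
                    (fun _ hcon => vowel_ne_star hC1.2 (by simpa using hcon.1)),
                  hsplit, List.range'_succ, List.range'_succ, List.range'_succ]
              have p0 : pieceB l ind = [l.getD (ind + 1) ' ', '*', l.getD (ind + 2) ' '] := by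
                unfold pieceB; rw [if_pos hs, if_pos hC1, if_neg hC2, if_pos hC3]
              simp [p0, pieceB_eat1 hs (Or.inl hC1.2), pieceB_eat2 hs hC1.2 (Or.inl hC3.2)]
            · -- 2-char token: lone vowel
              rw [if_neg hC3]
              have hnx2 : l.getD (ind + 2) ' ' ∉ vowels ∧ l.getD (ind + 2) ' ' ∉ hm := by
                by_cases hr : ind + 2 < l.length
                · exact ⟨fun hv => hC3 ⟨hr, hv⟩, fun hv => hC2 ⟨hr, hv⟩⟩
                · rw [getD_out (by omega)]; exact ⟨by decide, by decide⟩
              have hsplit : l.length - ind = (l.length - (ind + 2)) + 1 + 1 := by omega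
              rw [ih (ind + 2) (by omega)
                    (fun _ hcon => vowel_ne_star hC1.2 (by simpa using hcon.1))
                    (fun _ hcon => by
                      have := hcon.2.2
                      simp only [show ind + 2 - 2 = ind from by omega,
                                 show ind + 2 - 1 = ind + 1 from by omega] at hcon
                      rcases hcon.2.2 with hv | hv
                      exacts [hnx2.1 hv, hnx2.2 hv]),
                  hsplit, List.range'_succ, List.range'_succ]
              have p0 : pieceB l ind = [l.getD (ind + 1) ' ', '*'] := by
                unfold pieceB; rw [if_pos hs, if_pos hC1, if_neg hC2, if_neg hC3]
              simp [p0, pieceB_eat1 hs (Or.inl hC1.2)]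
        · rw [if_neg hC1]
          by_cases hC4 : ind + 1 < l.length ∧ l.getD (ind + 1) ' ' ∈ hm
          · -- 2-char token: H/M
            rw [if_pos hC4]
            have hsplit : l.length - ind = (l.length - (ind + 2)) + 1 + 1 := by omega
            rw [ih (ind + 2) (by omega)
                  (fun _ hcon => hm_ne_star hC4.2 (by simpa using hcon.1))
                  (fun _ hcon => by
                    simp only [show ind + 2 - 1 = ind + 1 from by omega] at hcon
                    exact hm_not_vowel hC4.2 hcon.2.1),
                hsplit, List.range'_succ, List.range'_succ]
            have p0 : pieceB l ind = [l.getD (ind + 1) ' ', '*'] := by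
              unfold pieceB; rw [if_pos hs, if_neg hC1, if_pos hC4]
            simp [p0, pieceB_eat1 hs (Or.inr hC4.2)]
          · -- 1-char token: lone '*'
            rw [if_neg hC4]
            have hnx : l.getD (ind + 1) ' ' ∉ vowels ∧ l.getD (ind + 1) ' ' ∉ hm := by
              by_cases hr : ind + 1 < l.length
              · exact ⟨fun hv => hC1 ⟨hr, hv⟩, fun hv => hC4 ⟨hr, hv⟩⟩
              · rw [getD_out (by omega)]; exact ⟨by decide, by decide⟩
            have hsplit : l.length - ind = (l.length - (ind + 1)) + 1 := by omega
            rw [ih (ind + 1) (by omega)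
                  (fun _ hcon => by
                    simp only [Nat.add_sub_cancel] at hcon
                    rcases hcon.2 with hv | hv
                    exacts [hnx.1 hv, hnx.2 hv])
                  (fun _ hcon => by
                    simp only [show ind + 1 - 1 = ind from by omega] at hcon
                    exact vowel_ne_star hcon.2.1 hs),
                hsplit, List.range'_succ]
            have p0 : pieceB l ind = ['*'] := by
              unfold pieceB; rw [if_pos hs, if_neg hC1, if_neg hC4]
            simp [p0]
      · -- ordinary character
        rw [if_neg hs]
        have hsplit : l.length - ind = (l.length - (ind + 1)) + 1 := by omega
        rw [ih (ind + 1) (by omega)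
              (fun _ hcon => by
                simp only [Nat.add_sub_cancel] at hcon
                exact hs hcon.1)
              (fun hge hcon => by
                simp only [show ind + 1 - 2 = ind - 1 from by omega,
                           show ind + 1 - 1 = ind from by omega] at hcon
                exact h1 (by omega) ⟨hcon.1, Or.inl hcon.2.1⟩),
            hsplit, List.range'_succ]
        have p0 : pieceB l ind = [l.getD ind ' '] := by
          unfold pieceB
          rw [if_neg hs,
              if_neg (fun hcon => h1 hcon.1 hcon.2),
              if_neg (fun hcon => h2 hcon.1 hcon.2)]
        simp [p0]
    · rw [loopA, dif_neg hn]
      have : l.length - ind = 0 := by omega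
      simp [this]

-- ===== VERDICT (by name: the statement is the Claim_ definition above) =====
theorem escape_vowel1_spec : Claim_equal_escape_vowel1 := by
  intro sen _
  unfold Spec_escape_vowel1 escape_vowel1 escape_vowel1_alt
  rw [loopA_pieces sen.toList sen.toList.length 0 (by omega)
        (fun h => absurd h (by omega)) (fun h => absurd h (by omega)) []]
  simp [List.range_eq_range']
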